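-- pv_equiv track=rewrite | github.com/ayushgupta-repo/MyDataStructureInPython | Problems/MagicianAndChocolates.py | maximumChocolates
-- ===== SOURCE A (Python) =====
-- def maximumChocolates(arr, k):
--     # Write your code here.
--     count = 0
--     total = 0
--
--     while count != k:
--         num = max(arr)
--         total += num
--
--         # for i in arr:
--         #     if i == num:
--         #         i = i//2
--         #         break
--
--         for i in range(len(arr)):
--             if arr[i] == num:
--                 arr[i] = arr[i]//2
--                 break
--
--         count += 1
--
--     return arr, total
-- ===== SOURCE B (Python) =====
-- def maximumChocolates(arr, k):
--     # Sorted-list simulation: keep items as a lexicographically sorted list of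
--     # (-value, index) pairs (so the current maximum, first-index on ties, is
--     # the head); each round pop the head, add its value, and re-insert the
--     # halved value at its sorted position.  Returns a fresh list (does not
--     # mutate arr in place).
--     items = []
--     for i, v in enumerate(arr):
--         p = (-v, i)
--         j = 0
--         while j < len(items) and items[j] < p:
--             j += 1
--         items.insert(j, p)
--     total = 0
--     for _ in range(k):
--         negv, i = items.pop(0)
--         v = -negv
--         total += v
--         p = (-(v // 2), i)
--         j = 0
--         while j < len(items) and items[j] < p:
--             j += 1
--         items.insert(j, p)
--     out = [0] * len(arr)
--     for negv, i in items:
--         out[i] = -negv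
--     return out, total
-- ===== Notes on version B (the rewrite author's own statement) =====
-- stated objective: alternative
-- what changed: A rescans the array twice per round (max() then an index search to halve the first maximum); B keeps a lexicographically sorted list of (-value, index) pairs, so each round pops the current maximum (first index on ties) from the front and re-inserts the halved pair at its sorted position, rebuilding the array from the pairs at the end.
import Mathlib
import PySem

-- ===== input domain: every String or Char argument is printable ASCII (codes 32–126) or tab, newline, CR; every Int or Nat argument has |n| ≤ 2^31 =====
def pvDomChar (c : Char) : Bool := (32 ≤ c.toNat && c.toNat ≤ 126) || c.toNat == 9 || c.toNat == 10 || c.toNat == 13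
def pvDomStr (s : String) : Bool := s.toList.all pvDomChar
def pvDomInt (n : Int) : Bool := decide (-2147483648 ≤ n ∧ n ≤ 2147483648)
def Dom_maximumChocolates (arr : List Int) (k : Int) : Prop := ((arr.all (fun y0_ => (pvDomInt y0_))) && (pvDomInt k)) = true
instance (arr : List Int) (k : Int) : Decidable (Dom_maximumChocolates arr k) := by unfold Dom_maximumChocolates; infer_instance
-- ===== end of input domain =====

-- B replaces A's per-round rescan (max + index search over the array) by a sorted list of
-- (-value, index) pairs with O(1) access to the current maximum; equivalence is about the
-- RETURN value only (Python A mutates arr in place, B returns a fresh list).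

-- ===== PORT A =====
-- the 'for i in range(len(arr)): if arr[i] == num: arr[i] = arr[i]//2; break' loop
def pvHalveFirst (num : Int) : List Int → List Int
  | [] => []
  | x :: xs => if x = num then PySem.Int.floordiv x 2 :: xs else x :: pvHalveFirst num xs

-- the 'while count != k' loop, one call per remaining iteration (k - count)
def pvLoopA : Nat → List Int → Int → List Int × Int
  | 0, arr, total => (arr, total)
  | n+1, arr, total =>
      let num := (PySem.List.max? arr id).getD 0   -- max(arr); [] is excluded by Pre_
      pvLoopA n (pvHalveFirst num arr) (total + num)

def maximumChocolates (arr : List Int) (k : Int) : List Int × Int :=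
  pvLoopA k.toNat arr 0

-- ===== PORT B =====
-- Python tuple comparison '<' on int pairs
def pvPlt (a b : Int × Int) : Bool := a.1 < b.1 || (a.1 == b.1 && a.2 < b.2)

-- the scan-and-insert ('while j < len(items) and items[j] < p' + items.insert(j, p)) block
def pvIns (p : Int × Int) : List (Int × Int) → List (Int × Int)
  | [] => [p]
  | q :: qs => if pvPlt q p then q :: pvIns p qs else p :: q :: qs

-- 'for i, v in enumerate(arr): insert (-v, i)'
def pvBuild (arr : List Int) : List (Int × Int) :=
  (PySem.List.enumerate arr).foldl (fun items iv => pvIns (-iv.2, iv.1) items) []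

-- 'for _ in range(k): pop(0); total += v; insert the halved pair'
def pvLoopB : Nat → List (Int × Int) → Int → List (Int × Int) × Int
  | 0, items, total => (items, total)
  | n+1, items, total =>
    match items with
    | [] => ([], total)   -- items.pop(0) raises IndexError in Python; excluded by Pre_
    | (negv, i) :: rest =>
        let v := -negv
        pvLoopB n (pvIns (-(PySem.Int.floordiv v 2), i) rest) (total + v)

-- 'out = [0]*len(arr); for negv, i in items: out[i] = -negv'
-- (.toNat is exact: every i stored in items comes from enumerate, hence 0 ≤ i)
def pvRebuild (n : Nat) (items : List (Int × Int)) : List Int :=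
  items.foldl (fun o p => o.set p.2.toNat (-p.1)) (List.replicate n 0)

def maximumChocolates_alt (arr : List Int) (k : Int) : List Int × Int :=
  let r := pvLoopB k.toNat (pvBuild arr) 0
  (pvRebuild arr.length r.1, r.2)

-- ===== PRECONDITION & SPEC =====
-- Pre_ excludes k < 0 (A's 'while count != k' never terminates) and arr = [] with k ≠ 0
-- (max([]) raises ValueError in A; B's items.pop(0) raises IndexError there too).
def Pre_maximumChocolates (arr : List Int) (k : Int) : Prop := 0 ≤ k ∧ (k = 0 ∨ arr ≠ [])
instance (arr : List Int) (k : Int) : Decidable (Pre_maximumChocolates arr k) := by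
  unfold Pre_maximumChocolates; infer_instance

def pvWitness_maximumChocolates : List Int × Int := ([5, 3, 8], 4)

def Spec_maximumChocolates (arr : List Int) (k : Int) (out : List Int × Int) : Prop := out = maximumChocolates_alt arr k
instance (arr : List Int) (k : Int) (out : List Int × Int) : Decidable (Spec_maximumChocolates arr k out) := by unfold Spec_maximumChocolates; infer_instance

-- ===== CLAIM (what is proved, stated in full; the proofs are below) =====
def Claim_equal_maximumChocolates : Prop := ∀ (arr : List Int) (k : Int), Dom_maximumChocolates arr k → Pre_maximumChocolates arr k → Spec_maximumChocolates arr k (maximumChocolates arr k)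

-- ===== LEMMAS AND PROOFS =====

-- abstraction: the multiset of (-value, index) pairs of the array, indices starting at s
def pvPairs (s : Int) : List Int → List (Int × Int)
  | [] => []
  | v :: vs => (-v, s) :: pvPairs (s+1) vs

-- the strict order pvPlt decides, as a Prop
def pvLt (a b : Int × Int) : Prop := pvPlt a b = true

theorem pvLt_iff (a b : Int × Int) : pvLt a b ↔ (a.1 < b.1 ∨ (a.1 = b.1 ∧ a.2 < b.2)) := by
  simp [pvLt, pvPlt]

theorem pvLt_asymm {a b : Int × Int} (h : pvLt a b) : ¬ pvLt b a := by
  rw [pvLt_iff] at *; omega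

theorem pvLt_trans {a b c : Int × Int} (h1 : pvLt a b) (h2 : pvLt b c) : pvLt a c := by
  rw [pvLt_iff] at *; omega

theorem pvLt_of_not_of_ne {p q : Int × Int} (h : ¬ pvLt q p) (hne : q.2 ≠ p.2) : pvLt p q := by
  rw [pvLt_iff] at *; omega

theorem pvIns_perm (p : Int × Int) (l : List (Int × Int)) : (pvIns p l).Perm (p :: l) := by
  induction l with
  | nil => simp [pvIns]
  | cons q qs ih =>
      simp only [pvIns]
      split
      · exact ((ih.cons q).trans (List.Perm.swap p q qs))
      · exact List.Perm.refl _

theorem pvIns_sorted {p : Int × Int} {l : List (Int × Int)}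
    (hs : l.Pairwise pvLt) (hne : ∀ q ∈ l, q.2 ≠ p.2) : (pvIns p l).Pairwise pvLt := by
  induction l with
  | nil => simp [pvIns]
  | cons q qs ih =>
      rcases List.pairwise_cons.mp hs with ⟨hq, hqs⟩
      simp only [pvIns]
      split
      · rename_i hlt
        refine List.pairwise_cons.mpr ⟨?_, ih hqs (fun r hr => hne r (List.mem_cons_of_mem _ hr))⟩
        intro r hr
        have hr' := (pvIns_perm p qs).mem_iff.mp hr
        rcases List.mem_cons.mp hr' with h | h
        · subst h; exact hlt
        · exact hq r h
      · rename_i hnlt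
        have hpq : pvLt p q := pvLt_of_not_of_ne hnlt (hne q (List.mem_cons_self))
        refine List.pairwise_cons.mpr ⟨?_, hs⟩
        intro r hr
        rcases List.mem_cons.mp hr with h | h
        · subst h; exact hpq
        · exact pvLt_trans hpq (hq r h)

-- bounds and values of pvPairs members
theorem mem_pvPairs {q : Int × Int} : ∀ {l : List Int} {s : Int}, q ∈ pvPairs s l →
    (s ≤ q.2 ∧ q.2 < s + l.length ∧ ∃ v ∈ l, q.1 = -v) := by
  intro l
  induction l with
  | nil => intro s h; simp [pvPairs] at h
  | cons v vs ih =>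
      intro s h
      simp only [pvPairs, List.mem_cons] at h
      rcases h with h | h
      · subst h
        refine ⟨le_refl _, ?_, v, by simp⟩
        simp only [List.length_cons]
        push_cast
        omega
      · rcases ih h with ⟨h1, h2, w, hw, hq⟩
        refine ⟨by omega, ?_, w, List.mem_cons_of_mem _ hw, hq⟩
        simp only [List.length_cons] at h2 ⊢
        push_cast at h2 ⊢
        omega

theorem pvPairs_append (xs ys : List Int) : ∀ s, pvPairs s (xs ++ ys) = pvPairs s xs ++ pvPairs (s + xs.length) ys := by
  induction xs with
  | nil => intro s; simp [pvPairs]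
  | cons x xs ih =>
      intro s
      have hcast : s + 1 + (xs.length : Int) = s + ((xs.length : Int) + 1) := by ring
      simp only [List.cons_append, pvPairs, ih (s+1), List.length_cons]
      push_cast
      rw [hcast]

-- extract the minimum from a sorted permutation
theorem sorted_head_min {items L : List (Int × Int)} {h : Int × Int}
    (hs : items.Pairwise pvLt) (hp : items.Perm L) (hmem : h ∈ L)
    (hmin : ∀ q ∈ L, q = h ∨ pvLt h q) :
    ∃ rest, items = h :: rest ∧ rest.Perm (L.erase h) := by
  cases items with
  | nil => exact absurd (hp.symm.subset hmem) (by simp)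
  | cons x rest =>
      have hx : x = h := by
        rcases hmin x (hp.subset List.mem_cons_self) with h1 | h1
        · exact h1
        · -- h ∈ x :: rest; h ≠ x since pvLt h x would contradict asymm of something
          have hh : h ∈ x :: rest := hp.symm.subset hmem
          rcases List.mem_cons.mp hh with h2 | h2
          · exact h2.symm
          · have := (List.pairwise_cons.mp hs).1 h h2
            exact absurd h1 (pvLt_asymm this)
      subst hx
      refine ⟨rest, rfl, ?_⟩
      have := hp.erase x
      rwa [List.erase_cons_head] at this

-- first-occurrence decomposition
theorem first_split {a : Int} : ∀ {l : List Int}, a ∈ l → ∃ pre suf, l = pre ++ a :: suf ∧ a ∉ pre := by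
  intro l
  induction l with
  | nil => intro h; simp at h
  | cons x xs ih =>
      intro h
      by_cases hx : x = a
      · exact ⟨[], xs, by simp [hx], by simp⟩
      · have h1 : a ∈ xs := by
          rcases List.mem_cons.mp h with h1 | h1
          · exact absurd h1.symm hx
          · exact h1
        rcases ih h1 with ⟨p, s, hl, hnp⟩
        refine ⟨x :: p, s, by simp [hl], ?_⟩
        simp only [List.mem_cons, not_or]
        exact ⟨fun h' => hx h'.symm, hnp⟩

theorem pvHalveFirst_split {M : Int} : ∀ {pre : List Int} (suf : List Int), M ∉ pre →
    pvHalveFirst M (pre ++ M :: suf) = pre ++ PySem.Int.floordiv M 2 :: suf := by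
  intro pre
  induction pre with
  | nil => intro suf _; simp [pvHalveFirst]
  | cons x xs ih =>
      intro suf hnp
      have hx : ¬ (x = M) := by simp only [List.mem_cons, not_or] at hnp; exact fun h => hnp.1 h.symm
      simp only [List.cons_append, pvHalveFirst, if_neg hx]
      rw [ih suf (by simp at hnp; exact hnp.2)]

-- max? of a nonempty list is some
-- the head pair of the sorted representation is (-max, first index of max)
theorem pv_min_pair {arr pre suf : List Int} {M : Int}
    (harr : arr = pre ++ M :: suf) (hpre : M ∉ pre) (hmax : ∀ y ∈ arr, y ≤ M) :
    ∀ q ∈ pvPairs 0 arr, q = (-M, (pre.length : Int)) ∨ pvLt (-M, (pre.length : Int)) q := by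
  intro q hq
  subst harr
  rw [pvPairs_append] at hq
  rcases List.mem_append.mp hq with h | h
  · rcases mem_pvPairs h with ⟨h1, h2, v, hv, hq1⟩
    have hvM : v ≤ M := hmax v (by simp [hv])
    have hvne : v ≠ M := fun h' => hpre (h' ▸ hv)
    right
    rw [pvLt_iff]
    left
    omega
  · simp only [pvPairs, List.mem_cons] at h
    rcases h with h | h
    · left; rw [h]; norm_num
    · rcases mem_pvPairs h with ⟨h1, h2, v, hv, hq1⟩
      have hvM : v ≤ M := hmax v (by simp [hv])
      right
      rw [pvLt_iff]
      omega

-- build invariant, generalized over the enumerate start and the accumulator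
theorem pvBuild_aux : ∀ (l : List Int) (s : Int) (acc : List (Int × Int)),
    acc.Pairwise pvLt → (∀ q ∈ acc, q.2 < s) →
    ((PySem.List.enumerate l s).foldl (fun items iv => pvIns (-iv.2, iv.1) items) acc).Pairwise pvLt ∧
    ((PySem.List.enumerate l s).foldl (fun items iv => pvIns (-iv.2, iv.1) items) acc).Perm (acc ++ pvPairs s l) ∧
    (∀ q ∈ (PySem.List.enumerate l s).foldl (fun items iv => pvIns (-iv.2, iv.1) items) acc, q.2 < s + l.length) := by
  intro l
  induction l with
  | nil =>
      intro s acc h1 h2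
      refine ⟨by simpa [PySem.List.enumerate_nil, pvPairs] using h1, by simp [PySem.List.enumerate_nil, pvPairs], ?_⟩
      intro q hq
      simp only [PySem.List.enumerate_nil, List.foldl_nil] at hq
      have := h2 q hq
      simp only [List.length_nil]
      omega
  | cons v vs ih =>
      intro s acc h1 h2
      rw [PySem.List.enumerate_cons, List.foldl_cons]
      have hperm := pvIns_perm (-v, s) acc
      have hsort : (pvIns (-v, s) acc).Pairwise pvLt :=
        pvIns_sorted h1 (fun q hq => ne_of_lt (h2 q hq))
      have hbound : ∀ q ∈ pvIns (-v, s) acc, q.2 < s + 1 := by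
        intro q hq
        rcases List.mem_cons.mp (hperm.subset hq) with h | h
        · subst h; simp
        · have := h2 q h; omega
      obtain ⟨r1, r2, r3⟩ := ih (s+1) _ hsort hbound
      refine ⟨r1, ?_, ?_⟩
      · have e1 : pvPairs s (v :: vs) = (-v, s) :: pvPairs (s+1) vs := rfl
        rw [e1]
        exact r2.trans ((hperm.append_right _).trans List.perm_middle.symm)
      · intro q hq
        have := r3 q hq
        simp only [List.length_cons]
        push_cast at this ⊢
        omega

-- main loop simulation
theorem pvLoop_sim : ∀ (n : Nat) (arr : List Int) (items : List (Int × Int)) (total : Int),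
    arr ≠ [] → items.Pairwise pvLt → items.Perm (pvPairs 0 arr) →
    (pvLoopB n items total).2 = (pvLoopA n arr total).2 ∧
    (pvLoopB n items total).1.Pairwise pvLt ∧
    (pvLoopB n items total).1.Perm (pvPairs 0 (pvLoopA n arr total).1) ∧
    (pvLoopA n arr total).1.length = arr.length := by
  intro n
  induction n with
  | zero => intro arr items total _ hs hp; exact ⟨rfl, hs, hp, rfl⟩
  | succ n ih =>
      intro arr items total hne hs hp
      -- max(arr)
      obtain ⟨M, hM⟩ : ∃ M, PySem.List.max? arr id = some M := by
        cases h : PySem.List.max? arr id with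
        | none => exact absurd ((PySem.List.max?_eq_none_iff arr id).mp h) hne
        | some m => exact ⟨m, rfl⟩
      have hMmem : M ∈ arr := PySem.List.max?_mem hM
      have hMmax : ∀ y ∈ arr, y ≤ M := by
        intro y hy
        simpa using PySem.List.max?_isMax hM y hy
      obtain ⟨pre, suf, harr, hpre⟩ := first_split hMmem
      set L : Int := (pre.length : Int) with hL
      -- the pair decomposition of arr
      have hpairs : pvPairs 0 arr = pvPairs 0 pre ++ (-M, L) :: pvPairs (L + 1) suf := by
        rw [harr, pvPairs_append]
        simp [pvPairs, hL]
      have hmin := pv_min_pair harr hpre hMmax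
      have hmem : (-M, L) ∈ pvPairs 0 arr := by
        rw [hpairs]; exact List.mem_append_right _ List.mem_cons_self
      obtain ⟨rest, hitems, hrest⟩ := sorted_head_min hs hp hmem hmin
      have hnotleft : (-M, L) ∉ pvPairs 0 pre := by
        intro h
        rcases mem_pvPairs h with ⟨h1, h2, _, _, _⟩
        omega
      have herase : (pvPairs 0 arr).erase (-M, L) = pvPairs 0 pre ++ pvPairs (L + 1) suf := by
        rw [hpairs, List.erase_append_right _ hnotleft, List.erase_cons_head]
      rw [herase] at hrest
      -- every index in rest differs from L
      have hrestne : ∀ q ∈ rest, q.2 ≠ L := by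
        intro q hq
        rcases List.mem_append.mp (hrest.subset hq) with h | h
        · rcases mem_pvPairs h with ⟨h1, h2, _, _, _⟩; omega
        · rcases mem_pvPairs h with ⟨h1, h2, _, _, _⟩; omega
      -- A's array after this round
      have hhalve : pvHalveFirst M arr = pre ++ PySem.Int.floordiv M 2 :: suf := by
        rw [harr]; exact pvHalveFirst_split suf hpre
      have harr' : pvPairs 0 (pvHalveFirst M arr) =
          pvPairs 0 pre ++ (-(PySem.Int.floordiv M 2), L) :: pvPairs (L + 1) suf := by
        rw [hhalve, pvPairs_append]
        simp [pvPairs, hL]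
      have hne' : pvHalveFirst M arr ≠ [] := by rw [hhalve]; exact List.append_ne_nil_of_right_ne_nil _ (by simp)
      have hlen' : (pvHalveFirst M arr).length = arr.length := by
        rw [hhalve, harr]; simp
      -- B's state after this round
      have hsort' : (pvIns (-(PySem.Int.floordiv M 2), L) rest).Pairwise pvLt := by
        refine pvIns_sorted ?_ hrestne
        exact (List.pairwise_cons.mp (hitems ▸ hs)).2
      have hperm' : (pvIns (-(PySem.Int.floordiv M 2), L) rest).Perm
          (pvPairs 0 (pvHalveFirst M arr)) := by
        refine (pvIns_perm _ _).trans ?_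
        refine (hrest.cons _).trans ?_
        rw [harr']
        exact List.perm_middle.symm
      obtain ⟨t1, t2, t3, t4⟩ := ih (pvHalveFirst M arr) (pvIns (-(PySem.Int.floordiv M 2), L) rest) (total + M) hne' hsort' hperm'
      -- unfold both loops one step
      rw [hitems]
      simp only [pvLoopA, pvLoopB, hM, Option.getD_some, neg_neg]
      exact ⟨t1, t2, t3, by rw [t4, hlen']⟩

-- rebuild lemmas
theorem foldl_set_length (items : List (Int × Int)) : ∀ (o : List Int),
    (items.foldl (fun o p => o.set p.2.toNat (-p.1)) o).length = o.length := by
  induction items with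
  | nil => intro o; rfl
  | cons p ps ih => intro o; rw [List.foldl_cons, ih, List.length_set]

theorem foldl_set_getElem?_ne {j : Nat} : ∀ (items : List (Int × Int)) (o : List Int),
    (∀ q ∈ items, q.2.toNat ≠ j) →
    (items.foldl (fun o p => o.set p.2.toNat (-p.1)) o)[j]? = o[j]? := by
  intro items
  induction items with
  | nil => intro o _; rfl
  | cons p ps ih =>
      intro o hne
      rw [List.foldl_cons, ih _ (fun q hq => hne q (List.mem_cons_of_mem _ hq)),
        List.getElem?_set_ne (hne p List.mem_cons_self)]

theorem pvPairs_countP (j : Int) : ∀ (l : List Int) (s : Int),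
    (pvPairs s l).countP (fun q => q.2 == j) = if s ≤ j ∧ j < s + l.length then 1 else 0 := by
  intro l
  induction l with
  | nil => intro s; simp [pvPairs]
  | cons v vs ih =>
      intro s
      simp only [pvPairs, List.countP_cons, ih (s+1), List.length_cons]
      push_cast
      split_ifs <;> simp_all <;> omega

theorem pvPairs_getElem : ∀ (l : List Int) (s : Int) (j : Nat) (hj : j < l.length),
    (-(l[j]), s + (j : Int)) ∈ pvPairs s l := by
  intro l
  induction l with
  | nil => intro s j hj; simp at hj
  | cons v vs ih =>
      intro s j hj
      cases j with
      | zero => simp [pvPairs]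
      | succ m =>
          have hj' : m < vs.length := by simpa using hj
          have hmem := ih (s+1) m hj'
          simp only [pvPairs, List.mem_cons, List.getElem_cons_succ]
          right
          have e : s + ((m+1 : Nat) : Int) = s + 1 + (m : Int) := by push_cast; ring
          rw [e]
          exact hmem

theorem pvRebuild_eq {arr : List Int} {items : List (Int × Int)}
    (hp : items.Perm (pvPairs 0 arr)) : pvRebuild arr.length items = arr := by
  have hlen : (pvRebuild arr.length items).length = arr.length := by
    rw [pvRebuild, foldl_set_length, List.length_replicate]
  apply List.ext_getElem?
  intro j
  by_cases hj : j < arr.length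
  · -- the unique pair with second component j
    have hmem : (-(arr[j]), (j : Int)) ∈ items := by
      rw [hp.mem_iff]
      simpa using pvPairs_getElem arr 0 j hj
    obtain ⟨l1, l2, hsplit⟩ := List.append_of_mem hmem
    have hcount : items.countP (fun q => q.2 == (j : Int)) = 1 := by
      rw [hp.countP_eq, pvPairs_countP]
      simp
      omega
    have hl2 : ∀ q ∈ l2, q.2.toNat ≠ j := by
      intro q hq
      have hq' : q ∈ items := by rw [hsplit]; exact List.mem_append_right _ (List.mem_cons_of_mem _ hq)
      have hq0 : 0 ≤ q.2 := by
        rcases mem_pvPairs (hp.subset hq') with ⟨h1, _, _⟩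
        omega
      intro htn
      have hqj : q.2 = (j : Int) := by omega
      have hpos : 0 < l2.countP (fun q : Int × Int => q.2 == (j : Int)) :=
        List.countP_pos_iff.mpr ⟨q, hq, by simp [hqj]⟩
      rw [hsplit, List.countP_append, List.countP_cons] at hcount
      simp only [beq_self_eq_true, if_true] at hcount
      omega
    rw [pvRebuild, hsplit, List.foldl_append, List.foldl_cons]
    rw [foldl_set_getElem?_ne _ _ hl2]
    have hjlt : j < ((l1.foldl (fun o p => o.set p.2.toNat (-p.1)) (List.replicate arr.length 0))).length := by
      rw [foldl_set_length, List.length_replicate]; exact hj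
    simp only [Int.toNat_natCast]
    rw [List.getElem?_set_self hjlt]
    simp [hj]
  · have h1 : (pvRebuild arr.length items)[j]? = none := List.getElem?_eq_none (by rw [hlen]; omega)
    have h2 : arr[j]? = none := List.getElem?_eq_none (by omega)
    rw [h1, h2]

-- ===== VERDICT (by name: the statement is the Claim_ definition above) =====
theorem maximumChocolates_spec : Claim_equal_maximumChocolates := by
  unfold Claim_equal_maximumChocolates
  intro arr k _ hpre
  obtain ⟨hk, hor⟩ := hpre
  unfold Spec_maximumChocolates maximumChocolates maximumChocolates_alt
  have hbuild := pvBuild_aux arr 0 [] (by simp) (by simp)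
  obtain ⟨hbs, hbp, -⟩ := hbuild
  rw [List.nil_append] at hbp
  rcases hor with hk0 | hne
  · subst hk0
    simp only [Int.toNat_zero, pvLoopA, pvLoopB]
    exact Prod.ext (by exact (pvRebuild_eq hbp).symm) rfl
  · obtain ⟨ht, hs', hp', hl⟩ := pvLoop_sim k.toNat arr (pvBuild arr) 0 hne hbs hbp
    refine Prod.ext ?_ ht.symm
    have : arr.length = (pvLoopA k.toNat arr 0).1.length := hl.symm
    rw [this]  -- wrong direction? we need rebuild arr.length = loopA.1
    exact (pvRebuild_eq hp').symm
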